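-- pv_equiv track=rewrite | github.com/mikebentley15/sandbox | python/multiplicative-permanence/multperm.py | prime_digits
-- ===== SOURCE A (Python) =====
-- def prime_digits(digits):
--     assert all(0 < x < 10 for x in digits)
--     pdigits = []
--     for x in digits:
--         if x < 2:
--             pass
--         elif x == 4: pdigits.extend([2, 2])
--         elif x == 6: pdigits.extend([2, 3])
--         elif x == 8: pdigits.extend([2, 2, 2])
--         elif x == 9: pdigits.extend([3, 3])
--         else:        pdigits.append(x)
--     pdigits.sort()
--     return pdigits
-- ===== SOURCE B (Python) =====
-- def prime_digits(digits):
--     assert all(0 < x < 10 for x in digits)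
--     c2 = c3 = c5 = c7 = 0
--     for x in digits:
--         if x == 2:   c2 += 1
--         elif x == 3: c3 += 1
--         elif x == 4: c2 += 2
--         elif x == 5: c5 += 1
--         elif x == 6: c2 += 1; c3 += 1
--         elif x == 7: c7 += 1
--         elif x == 8: c2 += 3
--         elif x == 9: c3 += 2
--     return [2] * c2 + [3] * c3 + [5] * c5 + [7] * c7
-- ===== Notes on version B (the rewrite author's own statement) =====
-- stated objective: alternative
-- what changed: Replaces building a factor list and comparison-sorting it with four integer counters incremented per digit, emitting the sorted output directly as replicated primes (a counting sort over the fixed alphabet {2,3,5,7}).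
import Mathlib
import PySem

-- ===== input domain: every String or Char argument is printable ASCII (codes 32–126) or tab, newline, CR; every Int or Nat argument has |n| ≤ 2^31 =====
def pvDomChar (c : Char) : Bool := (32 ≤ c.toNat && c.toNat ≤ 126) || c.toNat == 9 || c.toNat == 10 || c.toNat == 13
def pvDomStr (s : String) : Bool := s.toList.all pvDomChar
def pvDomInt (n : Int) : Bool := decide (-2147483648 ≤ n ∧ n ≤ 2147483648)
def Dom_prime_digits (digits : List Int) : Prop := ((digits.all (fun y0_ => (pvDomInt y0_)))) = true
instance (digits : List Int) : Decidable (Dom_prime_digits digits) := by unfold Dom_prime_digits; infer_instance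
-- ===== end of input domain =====

-- B replaces list-building + comparison sort with four prime counters and direct
-- sorted emission (counting sort over the fixed alphabet {2,3,5,7}); alternative algorithm.


-- ===== PORT A =====
def prime_digits (digits : List Int) : List Int :=
  let pdigits := digits.foldl (fun acc x =>
    if x < 2 then acc
    else if x = 4 then acc ++ [2, 2]
    else if x = 6 then acc ++ [2, 3]
    else if x = 8 then acc ++ [2, 2, 2]
    else if x = 9 then acc ++ [3, 3]
    else acc ++ [x]) []
  PySem.List.sorted pdigits (fun x => x) false

-- ===== PORT B =====
def pdStep (c : Int × Int × Int × Int) (x : Int) : Int × Int × Int × Int :=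
  if x = 2 then (c.1 + 1, c.2.1, c.2.2.1, c.2.2.2)
  else if x = 3 then (c.1, c.2.1 + 1, c.2.2.1, c.2.2.2)
  else if x = 4 then (c.1 + 2, c.2.1, c.2.2.1, c.2.2.2)
  else if x = 5 then (c.1, c.2.1, c.2.2.1 + 1, c.2.2.2)
  else if x = 6 then (c.1 + 1, c.2.1 + 1, c.2.2.1, c.2.2.2)
  else if x = 7 then (c.1, c.2.1, c.2.2.1, c.2.2.2 + 1)
  else if x = 8 then (c.1 + 3, c.2.1, c.2.2.1, c.2.2.2)
  else if x = 9 then (c.1, c.2.1 + 2, c.2.2.1, c.2.2.2)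
  else c

def prime_digits_alt (digits : List Int) : List Int :=
  let c := digits.foldl pdStep (0, 0, 0, 0)
  List.replicate c.1.toNat 2 ++ List.replicate c.2.1.toNat 3 ++
  List.replicate c.2.2.1.toNat 5 ++ List.replicate c.2.2.2.toNat 7

-- ===== PRECONDITION & SPEC =====
-- Pre_ excludes exactly the inputs on which A's `assert all(0 < x < 10 ...)` raises AssertionError.
def Pre_prime_digits (digits : List Int) : Prop := ∀ x ∈ digits, 0 < x ∧ x < 10
instance (digits : List Int) : Decidable (Pre_prime_digits digits) := by
  unfold Pre_prime_digits; infer_instance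
def pvWitness_prime_digits : List Int := [9, 8, 1, 5, 2]

def Spec_prime_digits (digits : List Int) (out : List Int) : Prop := out = prime_digits_alt digits
instance (digits : List Int) (out : List Int) : Decidable (Spec_prime_digits digits out) := by unfold Spec_prime_digits; infer_instance

-- ===== CLAIM (what is proved, stated in full; the proofs are below) =====
def Claim_equal_prime_digits : Prop := ∀ (digits : List Int), Dom_prime_digits digits → Pre_prime_digits digits → Spec_prime_digits digits (prime_digits digits)

-- ===== LEMMAS AND PROOFS =====

-- the factor list A appends for one digit
def pdFactors (x : Int) : List Int :=
  if x < 2 then []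
  else if x = 4 then [2, 2]
  else if x = 6 then [2, 3]
  else if x = 8 then [2, 2, 2]
  else if x = 9 then [3, 3]
  else [x]

theorem pdA_foldl (digits : List Int) : ∀ acc : List Int,
    digits.foldl (fun acc x =>
      if x < 2 then acc
      else if x = 4 then acc ++ [2, 2]
      else if x = 6 then acc ++ [2, 3]
      else if x = 8 then acc ++ [2, 2, 2]
      else if x = 9 then acc ++ [3, 3]
      else acc ++ [x]) acc = acc ++ digits.flatMap pdFactors := by
  induction digits with
  | nil => intro acc; simp
  | cons x t ih =>
    intro acc
    simp only [List.foldl_cons, List.flatMap_cons, ih, pdFactors]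
    split_ifs <;> simp

theorem pdFactors_mem (x : Int) (hx : 0 < x ∧ x < 10) :
    ∀ y ∈ pdFactors x, y = 2 ∨ y = 3 ∨ y = 5 ∨ y = 7 := by
  obtain ⟨h1, h2⟩ := hx
  interval_cases x <;> simp [pdFactors]

theorem pdB_counts (digits : List Int) (h : ∀ x ∈ digits, 0 < x ∧ x < 10) :
    ∀ c : Int × Int × Int × Int,
    digits.foldl pdStep c =
      (c.1 + ((digits.flatMap pdFactors).count 2 : Int),
       c.2.1 + ((digits.flatMap pdFactors).count 3 : Int),
       c.2.2.1 + ((digits.flatMap pdFactors).count 5 : Int),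
       c.2.2.2 + ((digits.flatMap pdFactors).count 7 : Int)) := by
  induction digits with
  | nil => intro c; simp
  | cons x t ih =>
    intro c
    have hx := h x (by simp)
    have ht : ∀ y ∈ t, 0 < y ∧ y < 10 := fun y hy => h y (by simp [hy])
    obtain ⟨h1, h2⟩ := hx
    simp only [List.foldl_cons, List.flatMap_cons, List.count_append]
    rw [ih ht]
    interval_cases x <;>
      simp [pdStep, pdFactors, Prod.ext_iff] <;> omega

theorem pdSorted_canonical (L : List Int) (h : ∀ y ∈ L, y = 2 ∨ y = 3 ∨ y = 5 ∨ y = 7) :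
    PySem.List.sorted L (fun x => x) false =
      List.replicate (L.count 2) 2 ++ List.replicate (L.count 3) 3 ++
      List.replicate (L.count 5) 5 ++ List.replicate (L.count 7) 7 := by
  apply PySem.List.sorted_id_eq_of_perm_of_pairwise
  · -- permutation: equal counts everywhere
    rw [List.perm_iff_count]
    intro a
    simp only [List.count_append, List.count_replicate]
    by_cases h2 : a = 2
    · subst h2; simp
    · by_cases h3 : a = 3
      · subst h3; simp
      · by_cases h5 : a = 5
        · subst h5; simp
        · by_cases h7 : a = 7
          · subst h7; simp
          · have hz : L.count a = 0 := List.count_eq_zero.mpr (fun hmem => by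
              rcases h a hmem with rfl | rfl | rfl | rfl <;> simp_all)
            have g2 : ¬(2:Int) = a := fun he => h2 he.symm
            have g3 : ¬(3:Int) = a := fun he => h3 he.symm
            have g5 : ¬(5:Int) = a := fun he => h5 he.symm
            have g7 : ¬(7:Int) = a := fun he => h7 he.symm
            simp [hz, g2, g3, g5, g7]
  · -- sortedness
    simp only [List.pairwise_append, List.pairwise_replicate, List.mem_replicate,
      List.mem_append]
    norm_num
    constructor
    · rintro a (⟨_, rfl⟩ | ⟨_, rfl⟩) _ <;> norm_num
    · rintro a ((⟨_, rfl⟩ | ⟨_, rfl⟩) | ⟨_, rfl⟩) _ <;> norm_num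

-- ===== VERDICT (by name: the statement is the Claim_ definition above) =====
theorem prime_digits_spec : Claim_equal_prime_digits := by
  intro digits _ hpre
  unfold Spec_prime_digits prime_digits prime_digits_alt
  rw [pdA_foldl digits [], pdB_counts digits hpre (0, 0, 0, 0)]
  simp only [List.nil_append]
  rw [pdSorted_canonical _ (fun y hy => by
    rcases List.mem_flatMap.mp hy with ⟨x, hx, hyx⟩
    exact pdFactors_mem x (hpre x hx) y hyx)]
  simp
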